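-- pv_equiv track=rewrite | github.com/aurokin/wowhead_cli | src/wowhead_cli/main.py | _slugify_path_fragment
-- ===== SOURCE A (Python) =====
-- def _slugify_path_fragment(value: str) -> str:
--     slug_chars: list[str] = []
--     last_dash = False
--     for char in value.lower():
--         if char.isalnum():
--             slug_chars.append(char)
--             last_dash = False
--             continue
--         if last_dash:
--             continue
--         slug_chars.append("-")
--         last_dash = True
--     rendered = "".join(slug_chars).strip("-")
--     return rendered or "guide"
-- ===== SOURCE B (Python) =====
-- def _slugify_path_fragment(value: str) -> str:
--     cleaned = "".join(c if c.isalnum() else "-" for c in value.lower())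
--     parts = [piece for piece in cleaned.split("-") if piece]
--     return "-".join(parts) or "guide"
-- ===== Notes on version B (the rewrite author's own statement) =====
-- stated objective: simpler
-- what changed: Replaces A's last_dash state machine plus the trailing strip with a declarative pipeline: map each non-alphanumeric character to a dash, split on dashes, drop the empty pieces, and rejoin with dashes.
import Mathlib
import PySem

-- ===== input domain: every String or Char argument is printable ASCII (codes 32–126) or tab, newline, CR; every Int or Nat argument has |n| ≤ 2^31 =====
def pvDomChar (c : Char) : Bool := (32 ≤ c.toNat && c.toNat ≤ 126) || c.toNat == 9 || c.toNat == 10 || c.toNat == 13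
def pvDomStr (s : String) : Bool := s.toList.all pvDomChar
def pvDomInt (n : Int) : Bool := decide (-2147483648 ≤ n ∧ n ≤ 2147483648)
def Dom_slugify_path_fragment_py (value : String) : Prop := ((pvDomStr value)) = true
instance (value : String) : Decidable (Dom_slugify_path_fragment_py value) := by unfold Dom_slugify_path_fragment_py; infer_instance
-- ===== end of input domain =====

-- B replaces A's last_dash state machine + trailing strip by: map non-alphanumerics to dashes, split on dashes, drop empty pieces, rejoin (objective: simpler); same value on every input.


-- ===== PORT A =====
-- the 'for char in value.lower()' loop: state = (slug_chars, last_dash), appends at the back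
def slugLoopA : List Char → List Char → Bool → List Char
  | [], slug_chars, _ => slug_chars
  | c :: cs, slug_chars, last_dash =>
    if PySem.Chars.isalnum c then slugLoopA cs (slug_chars ++ [c]) false
    else if last_dash then slugLoopA cs slug_chars last_dash
    else slugLoopA cs (slug_chars ++ ['-']) true

def slugify_path_fragment_py (value : String) : String :=
  let slug_chars := slugLoopA (PySem.Str.lower value).toList [] false
  -- "".join(slug_chars) of singleton strings is the string of that char list
  let rendered := PySem.Chars.stripChars slug_chars ['-']
  if rendered = [] then "guide" else String.ofList rendered

-- ===== PORT B =====
def slugify_path_fragment_py_alt (value : String) : String :=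
  let cleaned := (PySem.Str.lower value).toList.map
    (fun c => if PySem.Chars.isalnum c then c else '-')
  let parts := (PySem.Chars.splitOn cleaned ['-']).filter (fun p => !p.isEmpty)
  let joined := PySem.Chars.join ['-'] parts
  if joined = [] then "guide" else String.ofList joined

-- ===== PRECONDITION & SPEC =====
def Spec_slugify_path_fragment_py (value : String) (out : String) : Prop := out = slugify_path_fragment_py_alt value
instance (value : String) (out : String) : Decidable (Spec_slugify_path_fragment_py value out) := by unfold Spec_slugify_path_fragment_py; infer_instance

-- ===== CLAIM (what is proved, stated in full; the proofs are below) =====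
def Claim_equal_slugify_path_fragment_py : Prop := ∀ (value : String), Dom_slugify_path_fragment_py value → Spec_slugify_path_fragment_py value (slugify_path_fragment_py value)

-- ===== LEMMAS AND PROOFS =====

-- front-building form of A's loop
def recA : List Char → Bool → List Char
  | [], _ => []
  | c :: cs, ld =>
    if PySem.Chars.isalnum c then c :: recA cs false
    else if ld then recA cs ld
    else '-' :: recA cs true

-- canonical value: flag = "an alnum char has been emitted (a dash may become internal)"
def canonF : List Char → Bool → List Char
  | [], _ => []
  | c :: cs, inside =>
    if PySem.Chars.isalnum c then c :: canonF cs true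
    else if inside then
      match canonF cs false with
      | [] => []
      | l => '-' :: l
    else canonF cs false

lemma slugLoopA_eq (cs : List Char) : ∀ acc ld, slugLoopA cs acc ld = acc ++ recA cs ld := by
  induction cs with
  | nil => intro acc ld; simp [slugLoopA, recA]
  | cons c cs ih =>
    intro acc ld
    simp only [slugLoopA, recA]
    split
    · rw [ih]; simp
    · split
      · rw [ih]
      · rw [ih]; simp

lemma alnum_ne_dash {c : Char} (h : PySem.Chars.isalnum c = true) : ¬ (c = '-') := by
  intro he; subst he; exact absurd h (by decide)

def pd (c : Char) : Bool := List.contains ['-'] c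

lemma pd_eq (c : Char) : pd c = (c == '-') := by by_cases hc : c = '-' <;> simp [pd, hc]

lemma dropWhile_recA (cs : List Char) : ∀ ld, List.dropWhile pd (recA cs ld) = recA cs true := by
  induction cs with
  | nil => intro ld; simp [recA]
  | cons c cs ih =>
    intro ld
    by_cases h : PySem.Chars.isalnum c = true
    · have hpd : pd c = false := by rw [pd_eq]; simp [alnum_ne_dash h]
      simp only [recA, h, if_true, List.dropWhile_cons, hpd, Bool.false_eq_true, if_false]
    · cases ld with
      | true => simp only [recA, h, Bool.false_eq_true, if_false, if_true]; exact ih true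
      | false =>
        have hpd : pd '-' = true := by rw [pd_eq]; rfl
        simp only [recA, h, Bool.false_eq_true, if_false, List.dropWhile_cons, hpd, if_true]
        exact ih true

def rstripD (l : List Char) : List Char := (List.dropWhile pd l.reverse).reverse

lemma rstripD_cons (c : Char) (l : List Char) :
    rstripD (c :: l) = if rstripD l = [] then (if pd c then [] else [c]) else c :: rstripD l := by
  unfold rstripD
  rw [List.reverse_cons, List.dropWhile_append]
  by_cases h : List.dropWhile pd l.reverse = []
  · cases hc : pd c <;> simp [h, hc]
  · have h2 : (List.dropWhile pd l.reverse).reverse ≠ [] := by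
      simpa [List.reverse_eq_nil_iff] using h
    simp [h, h2]

lemma strip_recA (cs : List Char) :
    rstripD (recA cs true) = canonF cs false ∧ rstripD (recA cs false) = canonF cs true := by
  induction cs with
  | nil => simp [recA, canonF, rstripD]
  | cons c cs ih =>
    by_cases h : PySem.Chars.isalnum c = true
    · have hpd : pd c = false := by simp [pd_eq]; exact alnum_ne_dash h
      have key : rstripD (c :: recA cs false) = c :: canonF cs true := by
        rw [rstripD_cons, ih.2, hpd]
        split
        · next he => simp [he]
        · rfl
      constructor <;> simp [recA, canonF, h, key]
    · constructor
      · simp [recA, canonF, h]; exact ih.1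
      · have hpd : pd '-' = true := by simp [pd_eq]
        simp only [recA, canonF, h, if_false, if_true, Bool.false_eq_true]
        rw [rstripD_cons, ih.1, hpd]
        cases hcf : canonF cs false <;> simp

-- ===== B side =====

def mySplitP : List Char → List Char × List (List Char)
  | [] => ([], [])
  | c :: cs =>
    let r := mySplitP cs
    if c = '-' then ([], r.1 :: r.2) else (c :: r.1, r.2)

lemma splitOn_go_eq (fuel : Nat) : ∀ (l cur : List Char) (acc : List (List Char)), l.length < fuel →
    PySem.Chars.splitOn.go ['-'] fuel l cur acc
      = acc.reverse ++ (cur.reverse ++ (mySplitP l).1) :: (mySplitP l).2 := by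
  induction fuel with
  | zero => intro l cur acc h; omega
  | succ fuel ih =>
    intro l cur acc h
    cases l with
    | nil => simp [PySem.Chars.splitOn.go, mySplitP]
    | cons c rest =>
      rw [PySem.Chars.splitOn.go]
      by_cases hc : c = '-'
      · subst hc
        simp only [List.isPrefixOf, beq_self_eq_true, Bool.and_self,
          if_true, List.length_cons, List.length_nil, List.drop_succ_cons, List.drop_zero,
          Nat.zero_add]
        rw [ih rest [] (cur.reverse :: acc) (by simpa using Nat.lt_of_succ_lt_succ h)]
        simp [mySplitP]
      · have : (['-'].isPrefixOf (c :: rest)) = false := by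
          simp [List.isPrefixOf]; exact fun he => hc he.symm
        rw [this]
        simp only [Bool.false_eq_true, if_false]
        rw [ih rest (c :: cur) acc (by simpa using Nat.lt_of_succ_lt_succ h)]
        simp [mySplitP, hc]

lemma splitOn_eq (l : List Char) :
    PySem.Chars.splitOn l ['-'] = (mySplitP l).1 :: (mySplitP l).2 := by
  unfold PySem.Chars.splitOn
  rw [splitOn_go_eq (l.length + 1) l [] [] (by omega)]
  simp

def dashJoin : List (List Char) → List Char
  | [] => []
  | [q] => q
  | q :: q' :: qs => q ++ '-' :: dashJoin (q' :: qs)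

lemma join_eq_dashJoin (qs : List (List Char)) : PySem.Chars.join ['-'] qs = dashJoin qs := by
  induction qs with
  | nil => simp [PySem.Chars.join, dashJoin, List.intercalate]
  | cons q qs ih =>
    cases qs with
    | nil => simp [PySem.Chars.join, dashJoin, List.intercalate]
    | cons q' t =>
      simp only [dashJoin]
      rw [← ih]
      simp [PySem.Chars.join, List.intercalate, List.intersperse]

lemma dashJoin_ne_nil {q : List Char} (hq : q ≠ []) (qs : List (List Char)) :
    dashJoin (q :: qs) ≠ [] := by
  cases qs <;> simp [dashJoin, hq]

def dashRest (ps : List (List Char)) : List Char :=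
  match ps.filter (fun p => !p.isEmpty) with
  | [] => []
  | q :: qs => '-' :: dashJoin (q :: qs)

def gmap (c : Char) : Char := if PySem.Chars.isalnum c then c else '-'

lemma bMain (cs : List Char) :
    dashJoin (((mySplitP (cs.map gmap)).1 :: (mySplitP (cs.map gmap)).2).filter (fun p => !p.isEmpty))
      = canonF cs false
    ∧ (mySplitP (cs.map gmap)).1 ++ dashRest (mySplitP (cs.map gmap)).2 = canonF cs true := by
  induction cs with
  | nil => simp [mySplitP, dashJoin, dashRest, canonF]
  | cons c cs ih =>
    by_cases h : PySem.Chars.isalnum c = true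
    · have hg : gmap c = c := by simp [gmap, h]
      have hcd : ¬ (c = '-') := alnum_ne_dash h
      simp only [List.map_cons, hg, mySplitP, hcd, if_false] at *
      have key : dashJoin (((c :: (mySplitP (cs.map gmap)).1) :: (mySplitP (cs.map gmap)).2).filter (fun p => !p.isEmpty))
          = c :: ((mySplitP (cs.map gmap)).1 ++ dashRest (mySplitP (cs.map gmap)).2) := by
        rw [List.filter_cons_of_pos (by simp)]
        unfold dashRest
        cases hq : ((mySplitP (cs.map gmap)).2).filter (fun p => !p.isEmpty) with
        | nil => simp [dashJoin]
        | cons q qs => simp [dashJoin]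
      constructor
      · rw [key, ih.2]; simp [canonF, h]
      · simp only [List.cons_append, ih.2]; simp [canonF, h]
    · have hg : gmap c = '-' := by simp [gmap, h]
      simp only [List.map_cons, hg, mySplitP, if_true] at *
      constructor
      · rw [List.filter_cons_of_neg (by simp)]
        rw [ih.1]; simp [canonF, h]
      · simp only [List.nil_append]
        unfold dashRest
        simp only [canonF, h, if_false, Bool.false_eq_true, if_true]
        rw [← ih.1]
        cases hq : (((mySplitP (cs.map gmap)).1 :: (mySplitP (cs.map gmap)).2).filter (fun p => !p.isEmpty)) with
        | nil => simp [dashJoin]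
        | cons q qs =>
          have hqne : q ≠ [] := by
            have : q ∈ ((mySplitP (cs.map gmap)).1 :: (mySplitP (cs.map gmap)).2).filter (fun p => !p.isEmpty) := by
              rw [hq]; exact List.mem_cons_self
            have := List.of_mem_filter this
            simpa using this
          have := dashJoin_ne_nil hqne qs
          cases hd : dashJoin (q :: qs) with
          | nil => exact absurd hd this
          | cons x xs => simp [hd]

-- ===== VERDICT (by name: the statement is the Claim_ definition above) =====
theorem slugify_path_fragment_py_spec : Claim_equal_slugify_path_fragment_py := by
  intro value _
  unfold Spec_slugify_path_fragment_py slugify_path_fragment_py slugify_path_fragment_py_alt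
  simp only
  set cs := (PySem.Str.lower value).toList with hcs
  have hA : PySem.Chars.stripChars (slugLoopA cs [] false) ['-'] = canonF cs false := by
    rw [slugLoopA_eq, List.nil_append]
    show (List.dropWhile _ (List.dropWhile _ (recA cs false)).reverse).reverse = _
    rw [show (fun c => List.contains ['-'] c) = pd from rfl]
    rw [dropWhile_recA cs false]
    exact (strip_recA cs).1
  have hB : PySem.Chars.join ['-']
      ((PySem.Chars.splitOn (cs.map (fun c => if PySem.Chars.isalnum c then c else '-')) ['-']).filter (fun p => !p.isEmpty))
      = canonF cs false := by
    rw [show (fun c => if PySem.Chars.isalnum c then c else '-') = gmap from rfl]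
    rw [splitOn_eq, join_eq_dashJoin]
    exact (bMain cs).1
  rw [hA, hB]
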